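-- pv_equiv track=rewrite | github.com/DougScalioni/arxiv-curator | utils/email.py | _top_by_keywords
-- ===== SOURCE A (Python) =====
-- def _top_by_keywords(papers: list[dict], keywords: list[str]) -> list[tuple[dict, list[str]]]:
--     kw_lower = [kw.lower() for kw in keywords]
--     scored = []
--     for p in papers:
--         text = ((p.get("title") or "") + " " + (p.get("abstract") or "")).lower()
--         matched = [kw for kw in kw_lower if kw in text]
--         if matched:
--             scored.append((p, matched))
--     scored.sort(key=lambda x: -len(x[1]))
--     return scored[:50]
-- ===== SOURCE B (Python) =====
-- def _top_by_keywords(papers: list[dict], keywords: list[str]) -> list[tuple[dict, list[str]]]: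
--     kws = [kw.lower() for kw in keywords]
--     buckets = {}
--     for p in papers:
--         text = ((p.get("title") or "") + " " + (p.get("abstract") or "")).lower()
--         matched = [kw for kw in kws if kw in text]
--         if matched:
--             buckets.setdefault(len(matched), []).append((p, matched))
--     out = []
--     for c in range(len(kws), 0, -1):
--         out += buckets.get(c, [])
--     return out[:50]
-- ===== Notes on version B (the rewrite author's own statement) =====
-- stated objective: alternative
-- what changed: B replaces A's build-then-comparison-sort (list + sort(key=-len) + slice) by a single-pass distribution sort: papers are dropped into a dict of buckets keyed by match count as they are scored, and the buckets are concatenated in descending count order, which reproduces the stable descending-by-count order exactly.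
import Mathlib
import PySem

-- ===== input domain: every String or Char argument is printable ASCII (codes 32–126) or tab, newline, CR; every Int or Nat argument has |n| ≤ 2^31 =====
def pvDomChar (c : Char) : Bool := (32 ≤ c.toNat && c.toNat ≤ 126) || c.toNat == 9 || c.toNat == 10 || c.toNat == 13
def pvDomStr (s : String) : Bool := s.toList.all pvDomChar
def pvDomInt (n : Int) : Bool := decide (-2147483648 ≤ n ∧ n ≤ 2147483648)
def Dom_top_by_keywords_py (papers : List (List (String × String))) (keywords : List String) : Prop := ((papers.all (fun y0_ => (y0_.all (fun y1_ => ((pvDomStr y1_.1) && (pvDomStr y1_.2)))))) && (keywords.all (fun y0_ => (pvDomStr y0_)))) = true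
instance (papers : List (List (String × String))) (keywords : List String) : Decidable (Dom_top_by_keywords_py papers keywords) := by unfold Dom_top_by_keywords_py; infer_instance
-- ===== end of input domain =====

-- B replaces A's comparison sort by a single-pass bucket (distribution) grouping keyed by match
-- count, concatenated in descending count order; same return value, different algorithm.

-- ===== PORT A =====
-- text = ((p.get("title") or "") + " " + (p.get("abstract") or "")).lower()
-- ('x or ""' maps None and "" to "", so it is dict.get with default ""; '+' on str is
-- code-point concatenation, exact as List Char append; both Pythons compute this identically)
def pvText (p : List (String × String)) : List Char :=
  PySem.Chars.lower ((PySem.Dict.getD ⟨p⟩ "title" "").toList ++ ' ' :: (PySem.Dict.getD ⟨p⟩ "abstract" "").toList)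

-- matched = [kw for kw in kw_lower if kw in text]   (identical line in both Pythons)
def pvMatched (kwl : List String) (p : List (String × String)) : List String :=
  kwl.filter (fun kw => PySem.Chars.isIn kw.toList (pvText p))

def top_by_keywords_py (papers : List (List (String × String))) (keywords : List String) : List ((List (String × String)) × List String) :=
  let kw_lower := keywords.map PySem.Str.lower
  let scored := papers.foldl
    (fun acc p => if !(pvMatched kw_lower p).isEmpty then acc ++ [(p, pvMatched kw_lower p)] else acc) []
  PySem.List.slice (PySem.List.sorted scored (fun x => -(x.2.length : Int)) false) none (some 50)

-- ===== PORT B =====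
def top_by_keywords_py_alt (papers : List (List (String × String))) (keywords : List String) : List ((List (String × String)) × List String) :=
  let kws := keywords.map PySem.Str.lower
  -- buckets.setdefault(len(matched), []).append((p, matched))
  let buckets : PySem.Dict Int (List ((List (String × String)) × List String)) :=
    papers.foldl
      (fun d p =>
        if !(pvMatched kws p).isEmpty then
          d.modify ((pvMatched kws p).length : Int) [] (fun l => l ++ [(p, pvMatched kws p)])
        else d)
      PySem.Dict.empty
  -- for c in range(len(kws), 0, -1): out += buckets.get(c, [])
  let out := (PySem.List.pyRange (kws.length : Int) 0 (-1)).foldl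
    (fun acc c => acc ++ buckets.getD c []) []
  PySem.List.slice out none (some 50)

-- ===== PRECONDITION & SPEC =====
def Spec_top_by_keywords_py (papers : List (List (String × String))) (keywords : List String) (out : List ((List (String × String)) × List String)) : Prop := out = top_by_keywords_py_alt papers keywords
instance (papers : List (List (String × String))) (keywords : List String) (out : List ((List (String × String)) × List String)) : Decidable (Spec_top_by_keywords_py papers keywords out) := by unfold Spec_top_by_keywords_py; infer_instance

-- ===== CLAIM (what is proved, stated in full; the proofs are below) =====
def Claim_equal_top_by_keywords_py : Prop := ∀ (papers : List (List (String × String))) (keywords : List String), Dom_top_by_keywords_py papers keywords → Spec_top_by_keywords_py papers keywords (top_by_keywords_py papers keywords)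

-- ===== LEMMAS AND PROOFS =====

-- insertBy passes over a prefix it does not go before
theorem pv_insertBy_append_left {α : Type} (bf : α → α → Bool) (x : α) (L1 L2 : List α)
    (h : ∀ y ∈ L1, bf x y = false) :
    PySem.List.insertBy bf x (L1 ++ L2) = L1 ++ PySem.List.insertBy bf x L2 := by
  induction L1 with
  | nil => simp
  | cons y t ih =>
      have hy : bf x y = false := h y (by simp)
      simp [PySem.List.insertBy, hy]
      exact ih (fun z hz => h z (by simp [hz]))

theorem pv_insertBy_cons_of_true {α : Type} (bf : α → α → Bool) (x y : α) (t : List α)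
    (h : bf x y = true) : PySem.List.insertBy bf x (y :: t) = x :: y :: t := by
  simp [PySem.List.insertBy, h]

-- inserting an element whose key occurs in the (strictly increasing) key list ks lands it at the
-- end of its own bucket of the bucket decomposition
theorem pv_insertBy_flatMap {α : Type} (key : α → Int) (x : α) (ks : List Int)
    (hks : ks.Pairwise (· < ·)) (hx : key x ∈ ks) (l : List α) :
    PySem.List.insertBy (fun a b => decide (key a < key b)) x
        (ks.flatMap (fun k => l.filter (fun a => key a == k)))
      = ks.flatMap (fun k => (l ++ [x]).filter (fun a => key a == k)) := by
  induction ks with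
  | nil => simp at hx
  | cons k ks' ih =>
      have hlt : ∀ k' ∈ ks', k < k' := fun k' hk' => (List.pairwise_cons.1 hks).1 k' hk'
      by_cases hxk : key x = k
      · -- x belongs to the head bucket: skip it, then insert in front of the rest
        have htail : ks'.flatMap (fun k => (l ++ [x]).filter (fun a => key a == k)) =
            ks'.flatMap (fun k => l.filter (fun a => key a == k)) := by
          apply List.flatMap_congr
          intro k' hk'
          have : key x ≠ k' := by have := hlt k' hk'; omega
          simp [List.filter_append, this]
        rw [List.flatMap_cons, pv_insertBy_append_left]
        · rw [List.flatMap_cons, htail]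
          have hx50 : (l ++ [x]).filter (fun a => key a == k) =
              l.filter (fun a => key a == k) ++ [x] := by
            simp [List.filter_append, hxk]
          rw [hx50, List.append_assoc, List.singleton_append]
          congr 1
          -- insertBy x rest = x :: rest, since every element of rest has a larger key
          have hrest : ∀ y ∈ ks'.flatMap (fun k => l.filter (fun a => key a == k)),
              decide (key x < key y) = true := by
            intro y hy
            rcases List.mem_flatMap.1 hy with ⟨k', hk', hyf⟩
            have hky : key y = k' := by simpa using (List.of_mem_filter hyf)
            have := hlt k' hk'
            simp [hky, hxk]
            omega
          cases hcase : ks'.flatMap (fun k => l.filter (fun a => key a == k)) with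
          | nil => simp [PySem.List.insertBy]
          | cons y t =>
              exact pv_insertBy_cons_of_true _ x y t (hrest y (by rw [hcase]; simp))
        · intro y hy
          have : key y = k := by simpa using (List.of_mem_filter hy)
          simp [this, hxk]
      · -- x belongs to a later bucket
        have hx' : key x ∈ ks' := by
          rcases List.mem_cons.1 hx with h | h
          · exact absurd h hxk
          · exact h
        have hkx : k < key x := hlt _ hx'
        rw [List.flatMap_cons, pv_insertBy_append_left, List.flatMap_cons]
        · rw [ih (List.pairwise_cons.1 hks).2 hx']
          have : (l ++ [x]).filter (fun a => key a == k) = l.filter (fun a => key a == k) := by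
            simp [List.filter_append, hxk]
          rw [this]
        · intro y hy
          have : key y = k := by simpa using (List.of_mem_filter hy)
          simp [this]
          omega

-- stable sort by an Int key = concatenation of the key buckets in ascending key order
theorem pv_sorted_eq_flatMap_filter {α : Type} (key : α → Int) (l : List α) (ks : List Int)
    (hks : ks.Pairwise (· < ·)) (hmem : ∀ a ∈ l, key a ∈ ks) :
    PySem.List.sorted l key false = ks.flatMap (fun k => l.filter (fun a => key a == k)) := by
  rw [PySem.List.sorted_eq_foldl_insertBy]
  induction l using List.reverseRecOn with
  | nil => simp
  | append_singleton t x ih =>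
      rw [List.foldl_append]
      simp only [List.foldl_cons, List.foldl_nil]
      rw [ih (fun a ha => hmem a (by simp [ha]))]
      exact pv_insertBy_flatMap key x ks hks (hmem x (by simp)) t

-- the bucket dict of port B, read at any count c, is the c-bucket of A's scored list
theorem pv_buckets_getD (papers : List (List (String × String))) (kwl : List String) (c : Int) :
    (papers.foldl
      (fun d p =>
        if !(pvMatched kwl p).isEmpty then
          d.modify ((pvMatched kwl p).length : Int) [] (fun l => l ++ [(p, pvMatched kwl p)])
        else d)
      PySem.Dict.empty).getD c []
    = ((papers.filter (fun p => !(pvMatched kwl p).isEmpty)).map (fun p => (p, pvMatched kwl p))).filter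
        (fun q => (q.2.length : Int) == c) := by
  have h1 : papers.foldl
      (fun d p =>
        if !(pvMatched kwl p).isEmpty then
          d.modify ((pvMatched kwl p).length : Int) [] (fun l => l ++ [(p, pvMatched kwl p)])
        else d)
      PySem.Dict.empty
      = (papers.filter (fun p => !(pvMatched kwl p).isEmpty)).foldl
          (fun d p =>
            d.modify ((pvMatched kwl p).length : Int) [] (fun l => l ++ [(p, pvMatched kwl p)]))
          PySem.Dict.empty := (List.foldl_filter).symm
  have h2 : (papers.filter (fun p => !(pvMatched kwl p).isEmpty)).foldl
      (fun d p =>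
        d.modify ((pvMatched kwl p).length : Int) [] (fun l => l ++ [(p, pvMatched kwl p)]))
      PySem.Dict.empty
      = ((papers.filter (fun p => !(pvMatched kwl p).isEmpty)).map
          (fun p => (((pvMatched kwl p).length : Int), (p, pvMatched kwl p)))).foldl
          (fun d pr => d.modify pr.1 [] (fun l => l ++ [pr.2])) PySem.Dict.empty :=
    (List.foldl_map (f := fun p => (((pvMatched kwl p).length : Int), (p, pvMatched kwl p)))
      (g := fun (d : PySem.Dict Int (List ((List (String × String)) × List String))) pr =>
        d.modify pr.1 [] (fun l => l ++ [pr.2]))).symm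
  rw [h1, h2]
  rw [PySem.Dict.getD_foldl_modify_append]
  simp [List.filter_map, List.map_map, Function.comp_def, PySem.Dict.getD, PySem.Dict.get?,
    PySem.Dict.empty]

theorem pv_pyRange_desc (K : Nat) :
    PySem.List.pyRange (K : Int) 0 (-1) = (List.range K).map (fun (i : Nat) => (K : Int) - (i : Int)) := by
  rcases Nat.eq_zero_or_pos K with h | h
  · subst h; simp [PySem.List.pyRange]
  · have h0 : (0 : Int) < (K : Int) := by exact_mod_cast h
    simp only [PySem.List.pyRange]
    rw [if_neg (by norm_num), if_neg (by norm_num), if_pos h0]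
    have : (((K : Int) - 0 + -(-1) - 1) / -(-1)).toNat = K := by
      norm_num
    rw [this]
    apply List.map_congr_left
    intro i _
    omega

-- ===== VERDICT (by name: the statement is the Claim_ definition above) =====
theorem top_by_keywords_py_spec : Claim_equal_top_by_keywords_py := by
  intro papers keywords _
  unfold Spec_top_by_keywords_py
  simp only [top_by_keywords_py, top_by_keywords_py_alt]
  set kwl := keywords.map PySem.Str.lower with hkwl
  set K := kwl.length with hK
  set F := papers.filter (fun p => !(pvMatched kwl p).isEmpty) with hF
  set S := F.map (fun p => (p, pvMatched kwl p)) with hS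
  -- A's accumulation loop builds the filtered-and-paired list S
  have hscored : papers.foldl
      (fun acc p => if !(pvMatched kwl p).isEmpty then acc ++ [(p, pvMatched kwl p)] else acc) []
      = S := by
    simpa using PySem.List.foldl_append_if (fun p => !(pvMatched kwl p).isEmpty)
      (fun p => (p, pvMatched kwl p)) papers []
  rw [hscored]
  -- A's stable sort is the ascending-key bucket concatenation
  have hsorted : PySem.List.sorted S (fun x => -(x.2.length : Int)) false
      = ((List.range K).map (fun (i : Nat) => -(K : Int) + (i : Int))).flatMap
          (fun k => S.filter (fun a => (-(a.2.length : Int)) == k)) := by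
    apply pv_sorted_eq_flatMap_filter
    · refine List.Pairwise.map _ ?_ (List.pairwise_lt_range)
      intro a b hab
      omega
    · intro q hq
      rcases List.mem_map.1 hq with ⟨p, hp, rfl⟩
      have h1 : (pvMatched kwl p).isEmpty = false := by
        have := List.of_mem_filter hp
        simpa using this
      have hpos : 0 < (pvMatched kwl p).length := by
        rcases List.isEmpty_eq_false_iff_exists_mem.1 h1 with ⟨a, ha⟩
        exact List.length_pos_of_mem ha
      have hle : (pvMatched kwl p).length ≤ K := List.length_filter_le _ _
      refine List.mem_map.2 ⟨K - (pvMatched kwl p).length, List.mem_range.2 (by omega), ?_⟩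
      push_cast [Nat.cast_sub hle]
      omega
  rw [hsorted]
  -- B's output loop concatenates its buckets in descending count order
  rw [PySem.List.foldl_append_eq_flatMap, List.nil_append, pv_pyRange_desc K]
  -- both sides are now flatMaps over List.range K; identify them bucket by bucket
  rw [List.flatMap_map, List.flatMap_map]
  congr 1
  apply List.flatMap_congr
  intro i _
  rw [pv_buckets_getD papers kwl ((K : Int) - i)]
  rw [← hF, ← hS]
  apply List.filter_congr
  intro q _
  rw [Bool.eq_iff_iff, beq_iff_eq, beq_iff_eq]
  omega
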